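-- pv_equiv track=rewrite | github.com/ByAziX/FireArmor-AI-Anomaly-Detection | FireArmor IA/AI_With_ADFA/IA ADFA-LD/RandomForestClassifierWithPattern.py | preparer_vecteur
-- ===== SOURCE A (Python) =====
-- def preparer_vecteur(traces):
--     # Initialiser un dictionnaire pour stocker les vecteurs d'attaque
--     vecteur_attaque = {}
--
--     # Initialiser un ensemble pour stocker les caractéristiques uniques
--     caracteristiques = set()
--
--     # Initialiser un index pour suivre l'index actuel dans le vecteur d'attaque
--     index = 0
--
--     # Parcourir chaque trace dans les traces
--     for trace in traces:
--         # Parcourir une plage de tailles de 2 à 5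
--         for taille in range(2, 6):
--             # Parcourir la trace actuelle avec la taille actuelle
--             for i in range(0, len(trace) - taille):
--                 # Créer un sous-ensemble de la trace
--                 sous_ensemble = trace[i: i+taille]
--
--                 # Créer une clé en joignant les éléments du sous-ensemble avec un tiret
--                 pattern = "-".join(sous_ensemble)
--
--                 # Si la clé est dans les caractéristiques et pas dans le vecteur d'attaque, ajouter la pattern au vecteur d'attaque
--                 if pattern in caracteristiques:
--                     if pattern not in vecteur_attaque:
--                         vecteur_attaque[pattern] = index
--                         index += 1
--                 # Sinon, si la clé n'est pas dans les caractéristiques, ajouter la pattern aux caractéristiques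
--                 else:
--                     caracteristiques.add(pattern)
--
--     # Retourner le vecteur d'attaque
--     return vecteur_attaque
-- ===== SOURCE B (Python) =====
-- def preparer_vecteur(traces):
--     # Staged pipeline instead of an online scan: flatten all patterns into one
--     # stream, group the occurrence positions per pattern, then sort the repeated
--     # patterns by the position of their second occurrence and number them.
--     stream = ["-".join(trace[i:i+taille])
--               for trace in traces
--               for taille in range(2, 6)
--               for i in range(0, len(trace) - taille)]
--     occ = {}
--     for pos, pattern in enumerate(stream):
--         occ[pattern] = occ.get(pattern, []) + [pos]
--     repeated = sorted(((o[1], p) for p, o in occ.items() if len(o) >= 2),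
--                       key=lambda t: t[0])
--     return {p: k for k, (_, p) in enumerate(repeated)}
-- ===== Notes on version B (the rewrite author's own statement) =====
-- stated objective: alternative
-- what changed: Replaces A's online scan with a set and result dict by a staged pipeline: flatten every trace n-gram into one stream, group occurrence positions per pattern in a dict of lists, then sort the repeated patterns by their second-occurrence position and enumerate them.
import Mathlib
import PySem

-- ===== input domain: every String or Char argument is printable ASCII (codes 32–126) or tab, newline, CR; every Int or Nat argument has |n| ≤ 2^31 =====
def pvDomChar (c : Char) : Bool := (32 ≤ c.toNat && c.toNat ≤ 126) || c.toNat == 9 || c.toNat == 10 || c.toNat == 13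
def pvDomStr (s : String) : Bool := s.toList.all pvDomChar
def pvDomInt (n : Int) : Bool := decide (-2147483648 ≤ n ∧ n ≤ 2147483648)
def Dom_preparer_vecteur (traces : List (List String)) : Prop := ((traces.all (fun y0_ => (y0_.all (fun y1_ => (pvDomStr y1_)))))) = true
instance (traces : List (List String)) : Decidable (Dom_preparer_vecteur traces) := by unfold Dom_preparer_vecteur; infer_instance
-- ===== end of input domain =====

-- B replaces A's online scan (seen-set + result dict updated while scanning) by a staged
-- pipeline: flatten all patterns into one stream, group occurrence positions per pattern,
-- sort repeated patterns by second-occurrence position and enumerate them (alternative).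

-- ===== PORT A =====
-- loop body of A: state = (vecteur_attaque, caracteristiques, index)
def pvStepA (st : PySem.Dict String Int × PySem.Set String × Int) (pattern : String) :
    PySem.Dict String Int × PySem.Set String × Int :=
  if PySem.Set.contains st.2.1 pattern then
    if (PySem.Dict.get? st.1 pattern).isSome then st
    else (PySem.Dict.insert st.1 pattern st.2.2, st.2.1, st.2.2 + 1)
  else (st.1, PySem.Set.add st.2.1 pattern, st.2.2)

def preparer_vecteur (traces : List (List String)) : List (String × Int) :=
  (traces.foldl (fun st trace =>
    (PySem.List.pyRange 2 6 1).foldl (fun st taille =>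
      (PySem.List.pyRange 0 ((trace.length : Int) - taille) 1).foldl
        (fun st i =>
          pvStepA st (PySem.Str.join "-" (PySem.List.slice trace (some i) (some (i + taille)))))
        st)
      st)
    (PySem.Dict.empty, PySem.Set.empty, 0)).1.items

-- ===== PORT B =====
-- the flattened pattern stream (B's first comprehension)
def pvStreamB (traces : List (List String)) : List String :=
  traces.flatMap (fun trace =>
    (PySem.List.pyRange 2 6 1).flatMap (fun taille =>
      (PySem.List.pyRange 0 ((trace.length : Int) - taille) 1).map
        (fun i => PySem.Str.join "-" (PySem.List.slice trace (some i) (some (i + taille))))))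

def preparer_vecteur_alt (traces : List (List String)) : List (String × Int) :=
  let stream := pvStreamB traces
  let occ := (PySem.List.enumerate stream).foldl
      (fun d pp => PySem.Dict.modify d pp.2 [] (· ++ [pp.1])) PySem.Dict.empty
  let repeated := PySem.List.sorted
      ((occ.items.filter (fun pr => decide (2 ≤ pr.2.length))).map
        (fun pr => (PySem.List.pyGetD pr.2 1 0, pr.1)))
      (fun t => t.1) false
  (PySem.Dict.ofList ((PySem.List.enumerate repeated).map (fun kp => (kp.2.2, kp.1)))).items

-- ===== PRECONDITION & SPEC =====
def Spec_preparer_vecteur (traces : List (List String)) (out : List (String × Int)) : Prop := out = preparer_vecteur_alt traces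
instance (traces : List (List String)) (out : List (String × Int)) : Decidable (Spec_preparer_vecteur traces out) := by unfold Spec_preparer_vecteur; infer_instance

-- ===== CLAIM (what is proved, stated in full; the proofs are below) =====
def Claim_equal_preparer_vecteur : Prop := ∀ (traces : List (List String)), Dom_preparer_vecteur traces → Spec_preparer_vecteur traces (preparer_vecteur traces)

-- ===== LEMMAS AND PROOFS =====

-- the (position, pattern) pairs of the stream at which a pattern occurs for the SECOND time
def pvSecOcc (L : List String) : List (Int × String) :=
  (PySem.List.enumerate L).filter (fun jp => (L.take jp.1.toNat).count jp.2 == 1)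

-- the common value of both programs on a stream L
def pvRes (L : List String) : List (String × Int) :=
  (PySem.List.enumerate (pvSecOcc L)).map (fun kp => (kp.2.2, kp.1))

-- all occurrence positions of pattern p in the stream L
def pvPos (L : List String) (p : String) : List Int :=
  List.map (fun x => x.1) (List.filter (fun jp => jp.2 == p) (PySem.List.enumerate L))

-- B's repeated list before sorting
def pvRepeated (L : List String) : List (Int × String) :=
  ((PySem.Set.ofList L).filter (fun p => decide (2 ≤ (pvPos L p).length))).map
    (fun p => (PySem.List.pyGetD (pvPos L p) 1 0, p))

theorem pvStream_foldA (traces : List (List String))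
    (st : PySem.Dict String Int × PySem.Set String × Int) :
    traces.foldl (fun st trace =>
      (PySem.List.pyRange 2 6 1).foldl (fun st taille =>
        (PySem.List.pyRange 0 ((trace.length : Int) - taille) 1).foldl
          (fun st i =>
            pvStepA st (PySem.Str.join "-" (PySem.List.slice trace (some i) (some (i + taille)))))
          st)
        st)
      st
    = (pvStreamB traces).foldl pvStepA st := by
  unfold pvStreamB
  simp only [List.foldl_flatMap, List.foldl_map]

theorem pvSecOcc_append (L : List String) (x : String) :
    pvSecOcc (L ++ [x]) =
      pvSecOcc L ++ (if L.count x = 1 then [((L.length : Int), x)] else []) := by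
  unfold pvSecOcc
  rw [PySem.List.enumerate_append, List.filter_append]
  congr 1
  · apply List.filter_congr
    intro jp hjp
    rcases (PySem.List.mem_enumerate_iff L 0 jp).mp hjp with ⟨k, hk, rfl⟩
    simp only [zero_add, Int.toNat_natCast]
    rw [List.take_append_of_le_length (le_of_lt hk)]
  · rw [PySem.List.enumerate_cons, PySem.List.enumerate_nil]
    simp only [zero_add]
    have ht : (L ++ [x]).take ((L.length : Int)).toNat = L := by
      simp
    simp only [List.filter, ht]
    by_cases h : L.count x = 1
    · simp [h]
    · have hb : (List.count x L == 1) = false := by simpa using h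
      simp [hb, h]

theorem pvPos_append (L : List String) (x p : String) :
    pvPos (L ++ [x]) p = pvPos L p ++ (if x = p then [((L.length : Int))] else []) := by
  unfold pvPos
  rw [PySem.List.enumerate_append, List.filter_append, List.map_append]
  congr 1
  rw [PySem.List.enumerate_cons, PySem.List.enumerate_nil]
  by_cases h : x = p
  · simp [h]
  · simp [h]

theorem pvPos_length (L : List String) (p : String) : (pvPos L p).length = L.count p := by
  unfold pvPos
  rw [List.length_map, ← List.countP_eq_length_filter]
  conv_rhs => rw [← PySem.List.map_snd_enumerate L 0]
  rw [List.count, List.countP_map]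
  rfl

theorem pvPos_getElem? (L : List String) (p : String) (k : Nat) (j : Int) :
    (pvPos L p)[k]? = some j ↔
      ∃ n : Nat, j = (n : Int) ∧ ∃ hn : n < L.length, L[n] = p ∧ (L.take n).count p = k := by
  induction L using List.reverseRecOn generalizing k with
  | nil => simp [pvPos, PySem.List.enumerate_nil]
  | append_singleton L x ih =>
    rw [pvPos_append, List.getElem?_append]
    by_cases hk : k < (pvPos L p).length
    · rw [if_pos hk, ih]
      constructor
      · rintro ⟨n, rfl, hn, hp, hc⟩
        exact ⟨n, rfl, by simp; omega,
          by rw [List.getElem_append_left hn]; exact hp,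
          by rw [List.take_append_of_le_length (le_of_lt hn)]; exact hc⟩
      · rintro ⟨n, rfl, hn, hp, hc⟩
        have hnL : n < L.length := by
          by_contra hge
          have hn' : n = L.length := by simp at hn; omega
          subst hn'
          rw [List.take_append_of_le_length (le_refl _), List.take_length] at hc
          rw [pvPos_length] at hk; omega
        exact ⟨n, rfl, hnL,
          by rw [List.getElem_append_left hnL] at hp; exact hp,
          by rw [List.take_append_of_le_length (le_of_lt hnL)] at hc; exact hc⟩
    · rw [if_neg hk]
      rw [pvPos_length] at hk
      by_cases hx : x = p
      · subst hx
        rw [if_pos rfl]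
        constructor
        · intro h
          have hkk : k - (pvPos L x).length = 0 := by
            by_contra hne
            rcases Nat.exists_eq_succ_of_ne_zero hne with ⟨m, hm⟩
            simp [hm] at h
          rw [hkk] at h
          simp at h
          have hkeq : k = L.count x := by rw [pvPos_length] at hkk; omega
          refine ⟨L.length, h.symm, by simp, by simp, ?_⟩
          rw [List.take_append_of_le_length (le_refl _), List.take_length, hkeq]
        · rintro ⟨n, rfl, hn, hp, hc⟩
          have hnL : n = L.length := by
            by_contra hne
            have h1 : n < L.length := by simp at hn; omega
            rw [List.getElem_append_left h1] at hp
            rw [List.take_append_of_le_length (le_of_lt h1)] at hc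
            have h2 : (L.take (n+1)).count x = k + 1 := by
              rw [List.take_add_one]
              simp [List.count_append, List.getElem?_eq_getElem h1, hp, hc]
            have h3 : (L.take (n+1)).count x ≤ L.count x :=
              List.Sublist.count_le _ (List.take_sublist (n+1) L)
            omega
          subst hnL
          rw [List.take_append_of_le_length (le_refl _), List.take_length] at hc
          have : k - (pvPos L x).length = 0 := by rw [pvPos_length]; omega
          simp [this]
      · rw [if_neg hx]
        simp only [List.getElem?_nil, reduceCtorEq, false_iff]
        rintro ⟨n, rfl, hn, hp, hc⟩
        have hnL : n < L.length := by
          by_contra hge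
          have : n = L.length := by simp at hn; omega
          subst this
          rw [List.getElem_append_right (le_refl _)] at hp
          simp at hp
          exact hx hp
        rw [List.getElem_append_left hnL] at hp
        rw [List.take_append_of_le_length (le_of_lt hnL)] at hc
        have h2 : (L.take (n+1)).count p = k + 1 := by
          rw [List.take_add_one]
          simp [List.count_append, List.getElem?_eq_getElem hnL, hp, hc]
        have h3 : (L.take (n+1)).count p ≤ L.count p :=
          List.Sublist.count_le _ (List.take_sublist (n+1) L)
        omega

theorem pvAfold (L : List String) :
    ((L.foldl pvStepA (PySem.Dict.empty, PySem.Set.empty, 0)).1.items = pvRes L)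
    ∧ (L.foldl pvStepA (PySem.Dict.empty, PySem.Set.empty, 0)).1.keys.Nodup
    ∧ ((L.foldl pvStepA (PySem.Dict.empty, PySem.Set.empty, 0)).2.2 = ((pvSecOcc L).length : Int))
    ∧ (∀ p, p ∈ (L.foldl pvStepA (PySem.Dict.empty, PySem.Set.empty, 0)).2.1 ↔ 0 < L.count p)
    ∧ (∀ p, ((L.foldl pvStepA (PySem.Dict.empty, PySem.Set.empty, 0)).1.get? p).isSome = true
          ↔ 2 ≤ L.count p) := by
  induction L using List.reverseRecOn with
  | nil =>
    refine ⟨rfl, PySem.Dict.nodup_keys_empty, rfl, ?_, ?_⟩ <;> intro p <;>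
      simp [PySem.Set.empty, PySem.Dict.get?_empty]
  | append_singleton L x ih =>
    obtain ⟨h1, hnd, h2, h3, h4⟩ := ih
    rw [List.foldl_append]
    set st := L.foldl pvStepA (PySem.Dict.empty, PySem.Set.empty, 0) with hst
    simp only [List.foldl_cons, List.foldl_nil]
    have hres : pvRes (L ++ [x]) =
        pvRes L ++ (if L.count x = 1 then [(x, ((pvSecOcc L).length : Int))] else []) := by
      unfold pvRes
      rw [pvSecOcc_append]
      by_cases h : L.count x = 1
      · rw [if_pos h, if_pos h, PySem.List.enumerate_append, List.map_append]
        simp [PySem.List.enumerate_cons, PySem.List.enumerate_nil]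
      · rw [if_neg h, if_neg h]
        simp
    have hlen : (pvSecOcc (L ++ [x])).length =
        (pvSecOcc L).length + (if L.count x = 1 then 1 else 0) := by
      rw [pvSecOcc_append]
      by_cases h : L.count x = 1 <;> simp [h]
    have hcnt : ∀ p : String, (L ++ [x]).count p = L.count p + (if p = x then 1 else 0) := by
      intro p
      rw [List.count_append]
      by_cases h : p = x
      · simp [h]
      · simp [h, Ne.symm h]
    rcases Nat.lt_or_ge 0 (L.count x) with hc | hc
    · -- x already seen at least once
      have hmem : PySem.Set.contains st.2.1 x = true :=
        (PySem.Set.contains_iff _ _).mpr ((h3 x).mpr hc)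
      rw [pvStepA, if_pos hmem]
      rcases Nat.lt_or_ge (L.count x) 2 with hc2 | hc2
      · -- exactly once: second occurrence, insert
        have hone : L.count x = 1 := by omega
        have hns : ((st.1.get? x).isSome : Bool) = false := by
          rcases Bool.eq_false_or_eq_true (st.1.get? x).isSome with hh | hh
          · exact absurd ((h4 x).mp hh) (by omega)
          · exact hh
        rw [if_neg (by simp [hns])]
        refine ⟨?_, ?_, ?_, ?_, ?_⟩
        · simp only
          rw [PySem.Dict.items_insert_of_not_contains st.1 st.2.2
              (by rw [PySem.Dict.contains_eq_isSome_get?]; exact hns), h1, hres, if_pos hone, h2]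
        · exact PySem.Dict.nodup_keys_insert _ _ _ hnd
        · simp only
          rw [h2, hlen, if_pos hone]
          push_cast
          ring
        · intro p
          rw [hcnt p]
          simp only
          rw [h3 p]
          by_cases hpx : p = x
          · subst hpx; rw [if_pos rfl]; omega
          · simp [hpx]
        · intro p
          simp only
          rw [PySem.Dict.get?_insert, hcnt p]
          by_cases hpx : p = x
          · subst hpx; simp [hone]
          · simp [hpx]; rw [h4 p]
      · -- third or later occurrence: state unchanged
        have hs : ((st.1.get? x).isSome : Bool) = true := (h4 x).mpr hc2
        rw [if_pos hs]
        have hone : ¬ L.count x = 1 := by omega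
        refine ⟨?_, hnd, ?_, ?_, ?_⟩
        · rw [h1, hres, if_neg hone, List.append_nil]
        · rw [h2, hlen, if_neg hone]; simp
        · intro p
          rw [hcnt p, h3 p]
          by_cases hpx : p = x
          · subst hpx; rw [if_pos rfl]; omega
          · simp [hpx]
        · intro p
          rw [hcnt p, h4 p]
          by_cases hpx : p = x
          · subst hpx; rw [if_pos rfl]; omega
          · simp [hpx]
    · -- first occurrence
      have hzero : L.count x = 0 := by omega
      have hmem : ¬ PySem.Set.contains st.2.1 x = true := by
        intro hh
        exact absurd ((h3 x).mp ((PySem.Set.contains_iff _ _).mp hh)) (by omega)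
      rw [pvStepA, if_neg hmem]
      have hone : ¬ L.count x = 1 := by omega
      refine ⟨?_, hnd, ?_, ?_, ?_⟩
      · rw [h1, hres, if_neg hone, List.append_nil]
      · rw [h2, hlen, if_neg hone]; simp
      · intro p
        simp only
        rw [hcnt p, PySem.Set.mem_add]
        by_cases hpx : p = x
        · subst hpx; simp
        · simp only [if_neg hpx]
          rw [h3 p]
          simp [hpx]
      · intro p
        rw [hcnt p, h4 p]
        by_cases hpx : p = x
        · subst hpx; rw [if_pos rfl]; omega
        · simp [hpx]

theorem pvMem_secOcc (L : List String) (j : Int) (p : String) :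
    (j, p) ∈ pvSecOcc L ↔
      ∃ n : Nat, j = (n : Int) ∧ ∃ hn : n < L.length, L[n] = p ∧ (L.take n).count p = 1 := by
  unfold pvSecOcc
  rw [List.mem_filter]
  constructor
  · rintro ⟨hmem, hcond⟩
    rcases (PySem.List.mem_enumerate_iff L 0 _).mp hmem with ⟨k, hk, hpair⟩
    have hj : j = (k : Int) := by
      have := congrArg Prod.fst hpair; simpa using this
    have hp : L[k] = p := by
      have := congrArg Prod.snd hpair; simp at this; exact this.symm
    refine ⟨k, hj, hk, hp, ?_⟩
    simp only [hj] at hcond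
    simpa using hcond
  · rintro ⟨n, rfl, hn, hp, hc⟩
    refine ⟨(PySem.List.mem_enumerate_iff L 0 _).mpr ⟨n, hn, by simp [hp]⟩, by simpa using hc⟩

theorem pvSecOcc_pairwise (L : List String) :
    (pvSecOcc L).Pairwise (fun a b => a.1 < b.1) :=
  List.Pairwise.sublist List.filter_sublist (PySem.List.pairwise_lt_enumerate L 0)

theorem pvSecOcc_snd_nodup (L : List String) :
    ((pvSecOcc L).map (fun x => x.2)).Nodup := by
  have hpw : (pvSecOcc L).Pairwise (fun a b => a.2 ≠ b.2) := by
    apply List.Pairwise.imp_of_mem ?_ (pvSecOcc_pairwise L)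
    rintro ⟨j1, p1⟩ ⟨j2, p2⟩ ha hb hlt heq
    simp only at heq hlt
    subst heq
    rcases (pvMem_secOcc L j1 p1).mp ha with ⟨n1, rfl, hn1, hp1, hc1⟩
    rcases (pvMem_secOcc L j2 p1).mp hb with ⟨n2, rfl, hn2, hp2, hc2⟩
    have hnlt : n1 < n2 := by exact_mod_cast hlt
    have hsub : (L.take (n1+1)).Sublist (L.take n2) := by
      have : L.take (n1+1) = (L.take n2).take (n1+1) := by
        rw [List.take_take]; congr 1; omega
      rw [this]
      exact List.take_sublist _ _
    have h2 : (L.take (n1+1)).count p1 = 2 := by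
      rw [List.take_add_one]
      simp [List.count_append, List.getElem?_eq_getElem hn1, hp1, hc1]
    have h3 : (L.take (n1+1)).count p1 ≤ (L.take n2).count p1 :=
      List.Sublist.count_le _ hsub
    omega
  exact List.Pairwise.map _ (fun a b h => h) hpw

theorem pvMem_repeated (L : List String) (j : Int) (p : String) :
    (j, p) ∈ pvRepeated L ↔ (j, p) ∈ pvSecOcc L := by
  unfold pvRepeated
  rw [List.mem_map, pvMem_secOcc]
  constructor
  · rintro ⟨q, hq, hpair⟩
    have hqp : q = p := by have := congrArg Prod.snd hpair; simpa using this
    subst hqp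
    have hj : j = PySem.List.pyGetD (pvPos L q) 1 0 := by
      have := congrArg Prod.fst hpair; simpa using this.symm
    rw [List.mem_filter] at hq
    have hlen : 2 ≤ (pvPos L q).length := by simpa using hq.2
    have hget : (pvPos L q)[1]? = some ((pvPos L q)[1]'(by omega)) := List.getElem?_eq_getElem _
    rcases (pvPos_getElem? L q 1 _).mp hget with ⟨n, hn1, hn2, hn3, hn4⟩
    refine ⟨n, ?_, hn2, hn3, hn4⟩
    rw [hj, PySem.List.pyGetD_ofNat', List.getD_eq_getElem?_getD, hget]
    exact hn1
  · rintro ⟨n, rfl, hn, hp, hc⟩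
    have hcnt2 : 2 ≤ L.count p := by
      have h2 : (L.take (n+1)).count p = 2 := by
        rw [List.take_add_one]
        simp [List.count_append, List.getElem?_eq_getElem hn, hp, hc]
      have h3 : (L.take (n+1)).count p ≤ L.count p :=
        List.Sublist.count_le _ (List.take_sublist (n+1) L)
      omega
    have hlen : 2 ≤ (pvPos L p).length := by rw [pvPos_length]; exact hcnt2
    have hget : (pvPos L p)[1]? = some ((n : Int)) := by
      rw [pvPos_getElem?]
      exact ⟨n, rfl, hn, hp, hc⟩
    refine ⟨p, ?_, ?_⟩
    · rw [List.mem_filter]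
      refine ⟨(PySem.Set.mem_ofList L p).mpr ?_, by simpa using hlen⟩
      exact List.count_pos_iff.mp (by omega)
    · rw [PySem.List.pyGetD_ofNat', List.getD_eq_getElem?_getD, hget]
      rfl

theorem pvRepeated_nodup (L : List String) : (pvRepeated L).Nodup := by
  unfold pvRepeated
  apply List.Nodup.map
  · intro a b hab
    have := congrArg Prod.snd hab; simpa using this
  · exact List.Nodup.filter _ (PySem.Set.nodup_ofList L)

theorem pvSecOcc_nodup (L : List String) : (pvSecOcc L).Nodup := by
  apply List.Pairwise.imp ?_ (pvSecOcc_pairwise L)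
  intro a b h hab
  rw [hab] at h
  omega

theorem pvSorted_repeated (L : List String) :
    PySem.List.sorted (pvRepeated L) (fun t => t.1) false = pvSecOcc L := by
  apply PySem.List.sorted_eq_of_perm_of_pairwise_lt
  · rw [List.perm_ext_iff_of_nodup (pvSecOcc_nodup L) (pvRepeated_nodup L)]
    rintro ⟨j, p⟩
    rw [pvMem_repeated]
  · exact pvSecOcc_pairwise L

theorem pvAlt_eq (traces : List (List String)) :
    preparer_vecteur_alt traces = pvRes (pvStreamB traces) := by
  unfold preparer_vecteur_alt
  set L := pvStreamB traces with hL
  simp only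
  set occ := (PySem.List.enumerate L).foldl
      (fun d pp => PySem.Dict.modify d pp.2 [] (· ++ [pp.1])) PySem.Dict.empty with hocc
  have hswap : occ = ((PySem.List.enumerate L).map (fun pp => (pp.2, pp.1))).foldl
      (fun d q => PySem.Dict.modify d q.1 [] (· ++ [q.2])) PySem.Dict.empty := by
    rw [List.foldl_map]
  have hkeys : occ.keys = PySem.Set.ofList L := by
    rw [hocc]
    have h := PySem.Dict.keys_foldl_modify_key (PySem.List.enumerate L)
      (fun pp : Int × String => pp.2) ([] : List Int) (fun _ pp v => v ++ [pp.1]) PySem.Dict.empty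
    simpa [PySem.Dict.keys_empty, PySem.Set.update_nil_left, PySem.List.map_snd_enumerate] using h
  have hnd : occ.keys.Nodup := by
    rw [hocc]
    exact PySem.Dict.nodup_keys_foldl_modify_key _ _ _ _ _ PySem.Dict.nodup_keys_empty
  have hgetD : ∀ p, occ.getD p [] = pvPos L p := by
    intro p
    rw [hswap, PySem.Dict.getD_foldl_modify_append, PySem.Dict.getD_empty, List.nil_append]
    rw [List.filter_map]
    unfold pvPos
    rw [List.map_map]
    congr 1
  have hitems : occ.items = (PySem.Set.ofList L).map (fun p => (p, pvPos L p)) := by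
    rw [PySem.Dict.items_eq_map_keys occ hnd [], hkeys]
    apply List.map_congr_left
    intro p _
    rw [hgetD p]
  have hrep : (occ.items.filter (fun pr => decide (2 ≤ pr.2.length))).map
        (fun pr => (PySem.List.pyGetD pr.2 1 0, pr.1)) = pvRepeated L := by
    rw [hitems, List.filter_map, List.map_map]
    unfold pvRepeated
    congr 1
  rw [hrep, pvSorted_repeated]
  have hpairs : ((PySem.List.enumerate (pvSecOcc L)).map
      (fun kp => (kp.2.2, kp.1))).map (fun a => a.1) = (pvSecOcc L).map (fun x => x.2) := by
    rw [List.map_map]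
    conv_rhs => rw [← PySem.List.map_snd_enumerate (pvSecOcc L) 0, List.map_map]
    rfl
  have h := PySem.Dict.items_foldl_insert_fresh
      ((PySem.List.enumerate (pvSecOcc L)).map (fun kp => (kp.2.2, kp.1)))
      (fun a => a.1) (fun a => a.2) PySem.Dict.empty
      (fun a _ => PySem.Dict.contains_empty _)
      (hpairs ▸ pvSecOcc_snd_nodup L)
  refine h.trans ?_
  rw [show (PySem.Dict.empty : PySem.Dict String Int).items = [] from rfl, List.nil_append]
  unfold pvRes
  simp

-- ===== VERDICT (by name: the statement is the Claim_ definition above) =====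
theorem preparer_vecteur_spec : Claim_equal_preparer_vecteur := by
  intro traces _
  unfold Spec_preparer_vecteur
  rw [pvAlt_eq]
  unfold preparer_vecteur
  rw [pvStream_foldA]
  exact (pvAfold (pvStreamB traces)).1
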